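-- pv_equiv track=rewrite | github.com/razauh/inventory_management | modules/vendor/payment_history_view.py | _choose_tx_columns
-- ===== SOURCE A (Python) =====
-- from typing import Any, Dict, List, Optional, Tuple
--
-- def _choose_tx_columns(rows: List[Dict[str, Any]]) -> List[str]:
--     # Preferred column order; any extra keys appended at the end (stable)
--     preferred = [
--         "date",
--         "type",
--         "doc_id",
--         "amount_effect",
--         "balance_after",
--         "payment_id",
--         "method",
--         "instrument_no",
--         "instrument_type",
--         "clearing_state",
--         "ref_no",
--         "bank_account_id",
--         "vendor_bank_account_id",
--         "tx_id",
--     ]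
--     seen = {k for r in rows for k in r.keys()}
--     cols = [c for c in preferred if c in seen]
--     # Append any other discovered keys (deterministic order)
--     extras = sorted(k for k in seen if k not in set(preferred))
--     return cols + extras
-- ===== SOURCE B (Python) =====
-- from typing import Any, Dict, List
--
--
-- def _choose_tx_columns(rows: List[Dict[str, Any]]) -> List[str]:
--     preferred = [
--         "date",
--         "type",
--         "doc_id",
--         "amount_effect",
--         "balance_after",
--         "payment_id",
--         "method",
--         "instrument_no",
--         "instrument_type",
--         "clearing_state",
--         "ref_no",
--         "bank_account_id",
--         "vendor_bank_account_id",
--         "tx_id",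
--     ]
--     rank = {name: i for i, name in enumerate(preferred)}
--     seen = {k for r in rows for k in r.keys()}
--     return sorted(seen, key=lambda k: (rank.get(k, len(preferred)), k))
-- ===== Notes on version B (the rewrite author's own statement) =====
-- stated objective: alternative
-- what changed: Replaces A's two-pass construction (filter the preferred list against the seen set, then append the sorted non-preferred extras) by a single sort of all discovered keys under a composite key (rank-in-preferred-or-len, name) built from a rank dictionary.
import Mathlib
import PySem

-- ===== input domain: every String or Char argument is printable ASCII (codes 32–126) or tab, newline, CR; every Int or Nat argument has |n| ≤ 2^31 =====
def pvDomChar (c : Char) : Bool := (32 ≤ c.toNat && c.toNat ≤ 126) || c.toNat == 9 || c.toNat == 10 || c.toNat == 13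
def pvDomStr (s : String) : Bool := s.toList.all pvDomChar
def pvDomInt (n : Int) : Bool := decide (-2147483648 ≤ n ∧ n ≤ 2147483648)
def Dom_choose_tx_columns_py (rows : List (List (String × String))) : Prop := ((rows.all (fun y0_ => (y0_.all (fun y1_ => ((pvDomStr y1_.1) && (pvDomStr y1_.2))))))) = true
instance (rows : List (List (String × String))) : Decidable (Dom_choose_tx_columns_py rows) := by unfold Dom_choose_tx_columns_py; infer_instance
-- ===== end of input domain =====

-- B replaces A's two-step "filter preferred in order, then append sorted extras" by one
-- composite-key sort of the discovered keys under a rank dictionary (objective: alternative).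

-- the `preferred` list literal both Python sources contain
def pvPreferred : List String :=
  ["date", "type", "doc_id", "amount_effect", "balance_after", "payment_id",
   "method", "instrument_no", "instrument_type", "clearing_state", "ref_no",
   "bank_account_id", "vendor_bank_account_id", "tx_id"]

-- ===== PORT A =====
def choose_tx_columns_py (rows : List (List (String × String))) : List String :=
  let preferred := pvPreferred
  -- seen = {k for r in rows for k in r.keys()}
  let seen : PySem.Set String := PySem.Set.ofList (rows.flatMap (fun r => r.map Prod.fst))
  -- cols = [c for c in preferred if c in seen]
  let cols := preferred.filter (fun c => PySem.Set.contains seen c)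
  -- extras = sorted(k for k in seen if k not in set(preferred))
  let extras := PySem.List.sorted
    (seen.filter (fun k => !(PySem.Set.contains (PySem.Set.ofList preferred) k)))
    (fun x => x) false
  cols ++ extras

-- ===== PORT B =====
def choose_tx_columns_py_alt (rows : List (List (String × String))) : List String :=
  let preferred := pvPreferred
  -- rank = {name: i for i, name in enumerate(preferred)}
  let rank : PySem.Dict String Int :=
    (PySem.List.enumerate preferred 0).foldl
      (fun d p => PySem.Dict.insert d p.2 p.1) PySem.Dict.empty
  -- seen = {k for r in rows for k in r.keys()}
  let seen : PySem.Set String := PySem.Set.ofList (rows.flatMap (fun r => r.map Prod.fst))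
  -- sorted(seen, key=lambda k: (rank.get(k, len(preferred)), k))
  PySem.List.sorted2 seen
    (fun k => PySem.Dict.getD rank k (PySem.List.len preferred))
    (fun k => k) false

-- ===== PRECONDITION & SPEC =====
def Spec_choose_tx_columns_py (rows : List (List (String × String))) (out : List String) : Prop := out = choose_tx_columns_py_alt rows
instance (rows : List (List (String × String))) (out : List String) : Decidable (Spec_choose_tx_columns_py rows out) := by unfold Spec_choose_tx_columns_py; infer_instance

-- ===== CLAIM (what is proved, stated in full; the proofs are below) =====
def Claim_equal_choose_tx_columns_py : Prop := ∀ (rows : List (List (String × String))), Dom_choose_tx_columns_py rows → Spec_choose_tx_columns_py rows (choose_tx_columns_py rows)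

-- ===== LEMMAS AND PROOFS =====

-- the rank dictionary B builds (a closed value, shared by the lemmas below)
def pvRank : PySem.Dict String Int :=
  (PySem.List.enumerate pvPreferred 0).foldl
    (fun d p => PySem.Dict.insert d p.2 p.1) PySem.Dict.empty

-- sorted2 with keys k1, k2 is sorted with the lexicographic key toLex (k1 x, k2 x)
theorem pv_sorted2_eq_sorted_toLex {α : Type} (xs : List α) (k1 : α → Int) (k2 : α → String) :
    PySem.List.sorted2 xs k1 k2 false
      = PySem.List.sorted xs (fun x => toLex (k1 x, k2 x)) false := by
  unfold PySem.List.sorted2 PySem.List.sorted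
  simp only [if_neg (by decide : ¬ (false = true))]
  have hb : (fun a b => decide (k1 a < k1 b) || (!decide (k1 b < k1 a) && decide (k2 a < k2 b)))
      = (fun a b => decide ((fun x => toLex (k1 x, k2 x)) a < (fun x => toLex (k1 x, k2 x)) b)) := by
    funext a b
    rw [Bool.eq_iff_iff]
    simp only [Bool.or_eq_true, Bool.and_eq_true, Bool.not_eq_true', decide_eq_true_eq,
      decide_eq_false_iff_not, Prod.Lex.lt_iff, ofLex_toLex]
    constructor
    · rintro (h | ⟨hnb, h2⟩)
      · exact Or.inl h
      · rcases lt_trichotomy (k1 a) (k1 b) with h | h | h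
        · exact Or.inl h
        · exact Or.inr ⟨h, h2⟩
        · exact absurd h hnb
    · rintro (h | ⟨he, h2⟩)
      · exact Or.inl h
      · exact Or.inr ⟨by rw [he]; exact lt_irrefl _, h2⟩
  rw [hb]

theorem pv_rank_lt_of_mem : ∀ a ∈ pvPreferred, PySem.Dict.getD pvRank a 14 < 14 := by decide

theorem pv_pref_pairwise :
    pvPreferred.Pairwise (fun a b => PySem.Dict.getD pvRank a 14 < PySem.Dict.getD pvRank b 14) := by
  decide

theorem pv_rank_of_not_mem (k : String) (hk : k ∉ pvPreferred) :
    PySem.Dict.getD pvRank k 14 = 14 := by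
  simp only [pvPreferred, List.mem_cons, List.not_mem_nil, or_false, not_or] at hk
  obtain ⟨h1, h2, h3, h4, h5, h6, h7, h8, h9, h10, h11, h12, h13, h14⟩ := hk
  simp [pvRank, pvPreferred, PySem.List.enumerate, PySem.Dict.getD, PySem.Dict.get?,
    PySem.Dict.insert, PySem.Dict.empty, PySem.Dict.contains]
  have e : ∀ s : String, ¬ k = s → (s == k) = false :=
    fun s hs => beq_eq_false_iff_ne.mpr (Ne.symm hs)
  simp [e _ h1, e _ h2, e _ h3, e _ h4, e _ h5, e _ h6, e _ h7, e _ h8, e _ h9, e _ h10,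
    e _ h11, e _ h12, e _ h13, e _ h14]

-- ===== VERDICT (by name: the statement is the Claim_ definition above) =====
theorem choose_tx_columns_py_spec : Claim_equal_choose_tx_columns_py := by
  intro rows _
  show choose_tx_columns_py rows = choose_tx_columns_py_alt rows
  unfold choose_tx_columns_py choose_tx_columns_py_alt
  simp only []
  set S : PySem.Set String := PySem.Set.ofList (rows.flatMap (fun r => r.map Prod.fst)) with hS
  rw [show ((PySem.List.enumerate pvPreferred 0).foldl
      (fun d p => PySem.Dict.insert d p.2 p.1) PySem.Dict.empty) = pvRank from rfl]
  rw [show PySem.List.len pvPreferred = 14 from rfl]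
  rw [pv_sorted2_eq_sorted_toLex]
  have hSnodup : S.Nodup := PySem.Set.nodup_ofList _
  set p : String → Bool := fun k => PySem.Set.contains (PySem.Set.ofList pvPreferred) k with hp
  set key : String → Lex (Int × String) := fun k => toLex (PySem.Dict.getD pvRank k 14, k) with hkey
  set cols : List String := pvPreferred.filter (fun c => PySem.Set.contains S c) with hcols
  set extras : List String := PySem.List.sorted (S.filter (fun k => !(p k))) (fun x => x) false with hextras
  have hext_not_pref : ∀ b ∈ extras, b ∉ pvPreferred := by
    intro b hb
    rw [hextras, PySem.List.mem_sorted, List.mem_filter] at hb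
    have h2 := hb.2
    simp only [hp, Bool.not_eq_true', PySem.Set.contains_eq_listContains] at h2
    intro hmem
    have : b ∉ PySem.Set.ofList pvPreferred := by simpa using h2
    exact this ((PySem.Set.mem_ofList _ _).mpr hmem)
  have hperm : (cols ++ extras).Perm S := by
    have h1 : cols.Perm (S.filter p) := by
      rw [List.perm_ext_iff_of_nodup ((by decide : pvPreferred.Nodup).filter _) (hSnodup.filter _)]
      intro x
      simp [hp, List.mem_filter, PySem.Set.mem_ofList, and_comm]
    have h2 : extras.Perm (S.filter (fun k => !(p k))) := PySem.List.sorted_perm _ _ _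
    exact (h1.append h2).trans (List.filter_append_perm p S)
  have hpair : (cols ++ extras).Pairwise (fun a b => key a < key b) := by
    rw [List.pairwise_append]
    refine ⟨?_, ?_, ?_⟩
    · have hsub : cols.Sublist pvPreferred := List.filter_sublist
      refine (pv_pref_pairwise.sublist hsub).imp ?_
      intro a b h
      exact Prod.Lex.lt_iff.mpr (Or.inl h)
    · have hle := PySem.List.sorted_pairwise (S.filter (fun k => !(p k))) (fun x => x)
      have hnd : extras.Nodup := (PySem.List.sorted_perm _ _ _).symm.nodup (hSnodup.filter _)
      have hlt : extras.Pairwise (fun a b : String => a < b) := by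
        refine ((hextras ▸ hle).and hnd).imp ?_
        intro a b h
        exact lt_of_le_of_ne h.1 h.2
      refine hlt.imp_of_mem ?_
      intro a b ha hb h
      refine Prod.Lex.lt_iff.mpr (Or.inr ⟨?_, h⟩)
      show PySem.Dict.getD pvRank a 14 = PySem.Dict.getD pvRank b 14
      rw [pv_rank_of_not_mem a (hext_not_pref a ha), pv_rank_of_not_mem b (hext_not_pref b hb)]
    · intro a ha b hb
      have haP : a ∈ pvPreferred := (List.mem_filter.mp (hcols ▸ ha)).1
      refine Prod.Lex.lt_iff.mpr (Or.inl ?_)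
      show PySem.Dict.getD pvRank a 14 < PySem.Dict.getD pvRank b 14
      rw [pv_rank_of_not_mem b (hext_not_pref b hb)]
      exact pv_rank_lt_of_mem a haP
  exact (PySem.List.sorted_eq_of_perm_of_pairwise_lt S (cols ++ extras) key hperm hpair).symm
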